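-- pv_equiv track=rewrite | github.com/Kazun1998/library_for_python | Convolution/OR_Convolution.py | Convolution_Power_OR
-- ===== SOURCE A (Python) =====
-- def Subset_Zeta_Transform(A):
--     """ A の部分集合に関する Zeta 変換を求める.
--
--     A の長さはある整数 N を用いて, 2^N でなくてはならない.
--     """
--
--     N=(len(A)-1).bit_length()
--     assert 1<<N==len(A), "列の要素数は 2^N でなくてはなりません."
--
--     for i in range(N):
--         b=1<<i
--         for S in range(1<<N):
--             if (S & b):
--                 A[S]+=A[S^b]
--
--         for S in range(1<<N):
--             A[S]%=Mod
--
-- def Subset_Mobius_Transform(A):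
--     """ A の部分集合に関する Mobius 変換を求める.
--
--     A の長さはある整数 N を用いて, 2^N でなくてはならない.
--     """
--
--     N=(len(A)-1).bit_length()
--     assert 1<<N==len(A), "列の要素数は 2^N でなくてはなりません."
--
--     for i in range(N):
--         b=1<<i
--         for S in range(1<<N):
--             if (S & b):
--                 A[S]-=A[S^b]
--
--         for S in range(1<<N):
--             A[S]%=Mod
--
-- def Convolution_Power_OR(A,k):
--     """ OR 演算に関する k 回の畳込みを行う.
--
--     A: List
--     """
--
--     N=len(A)
--     L=1<<(N-1).bit_length()
--
--     A=A+[0]*(L-N)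
--
--     Subset_Zeta_Transform(A)
--
--     A=[pow(A[i],k,Mod) for i in range(L)]
--
--     Subset_Mobius_Transform(A)
--     return A
--
-- Mod=998244353
-- ===== SOURCE B (Python) =====
-- # OR-convolution power via subset zeta/Mobius, with both transforms done as
-- # top-down divide-and-conquer over the top bit instead of bottom-up bit layers.
-- Mod = 998244353
--
-- def _zeta(a):
--     m = len(a)
--     if m <= 1:
--         return list(a)
--     h = m // 2
--     lo = _zeta(a[:h])
--     hi = _zeta(a[h:])
--     return lo + [(x + y) % Mod for x, y in zip(hi, lo)]
--
-- def _mobius(a):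
--     m = len(a)
--     if m <= 1:
--         return list(a)
--     h = m // 2
--     lo = _mobius(a[:h])
--     hi = _mobius(a[h:])
--     return lo + [(x - y) % Mod for x, y in zip(hi, lo)]
--
-- def Convolution_Power_OR(A, k):
--     L = 1 << (len(A) - 1).bit_length()
--     z = _zeta(list(A) + [0] * (L - len(A)))
--     p = [pow(x, k, Mod) for x in z]
--     return _mobius(p)
-- ===== Notes on version B (the rewrite author's own statement) =====
-- stated objective: alternative
-- what changed: Both subset transforms (zeta and Mobius) are reimplemented as top-down divide-and-conquer recursion over the top bit (split into halves, recurse, combine with one modular add/sub pass) instead of the bottom-up in-place bit-layer double loops, and the padding length is computed the same way; pow(x,k,Mod) stays a builtin call.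
import Mathlib
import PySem

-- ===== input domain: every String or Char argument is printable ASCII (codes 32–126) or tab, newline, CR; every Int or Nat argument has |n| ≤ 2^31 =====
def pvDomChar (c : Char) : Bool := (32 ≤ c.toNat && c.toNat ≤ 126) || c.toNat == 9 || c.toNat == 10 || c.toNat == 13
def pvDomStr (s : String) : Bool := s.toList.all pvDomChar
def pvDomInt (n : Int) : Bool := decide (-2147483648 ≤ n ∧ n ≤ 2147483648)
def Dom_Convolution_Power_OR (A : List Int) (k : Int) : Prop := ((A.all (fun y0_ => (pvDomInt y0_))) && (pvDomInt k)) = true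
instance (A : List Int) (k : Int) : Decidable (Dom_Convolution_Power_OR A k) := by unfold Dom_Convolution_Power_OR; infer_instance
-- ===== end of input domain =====

-- B re-implements both subset transforms as top-down divide-and-conquer recursion over the top
-- bit instead of A's bottom-up in-place bit-layer double loops (objective: alternative, same cost).

-- ===== PORT A =====

-- the module constant Mod
def pvM : Int := 998244353

-- pow(x, k, Mod) by binary exponentiation (value-exact: PySem.Int.powMod would compute b^e in
-- full before reducing, which is infeasible for the exponents Dom admits).
def pvPowAux (b e m : Nat) : Nat :=
  if h : e = 0 then 1 % m
  else
    let r := pvPowAux (b * b % m) (e / 2) m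
    if e % 2 = 1 then r * b % m else r
termination_by e
decreasing_by exact Nat.div_lt_self (Nat.pos_of_ne_zero h) one_lt_two

-- pow(x, k, Mod); for k < 0 Python inverts x modulo the prime Mod (the inverse, which exists on
-- every input Pre_ admits, is x^(Mod-2) mod Mod); outside Pre_ Python raises ValueError instead.
def pvPow (x k : Int) : Int :=
  if k < 0 then
    (pvPowAux (pvPowAux (PySem.Int.mod x pvM).toNat 998244351 998244353) k.natAbs 998244353 : Int)
  else (pvPowAux (PySem.Int.mod x pvM).toNat k.toNat 998244353 : Int)

-- one step of `for S in range(1<<N): if S & b: A[S] = A[S] op A[S^b]`  (all indices in range)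
def pvStep (f : Int → Int → Int) (b : Nat) (B : List Int) (S : Nat) : List Int :=
  if S &&& b ≠ 0 then B.set S (f (B.getD S 0) (B.getD (S ^^^ b) 0)) else B

def pvLayer (f : Int → Int → Int) (b n : Nat) (A : List Int) : List Int :=
  (List.range n).foldl (pvStep f b) A

-- one step of `for S in range(1<<N): A[S] %= Mod`
def pvModStep (B : List Int) (S : Nat) : List Int := B.set S (PySem.Int.mod (B.getD S 0) pvM)

def pvModLayer (n : Nat) (A : List Int) : List Int := (List.range n).foldl pvModStep A

-- the common `for i in range(N):` body of both transforms, f = (+) for zeta, (-) for Mobius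
def pvCore (f : Int → Int → Int) (N : Nat) (A : List Int) : List Int :=
  (List.range N).foldl (fun B i => pvModLayer (1 <<< N) (pvLayer f (1 <<< i) (1 <<< N) B)) A

def Subset_Zeta_Transform (A : List Int) : List Int :=
  pvCore (· + ·) (PySem.Int.bitLength ((A.length : Int) - 1)) A

def Subset_Mobius_Transform (A : List Int) : List Int :=
  pvCore (· - ·) (PySem.Int.bitLength ((A.length : Int) - 1)) A

def Convolution_Power_OR (A : List Int) (k : Int) : List Int :=
  let N := A.length
  let L := 1 <<< PySem.Int.bitLength ((N : Int) - 1)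
  let A1 := A ++ List.replicate (L - N) 0
  let A2 := Subset_Zeta_Transform A1
  let A3 := (List.range L).map (fun i => pvPow (A2.getD i 0) k)
  Subset_Mobius_Transform A3

-- ===== PORT B =====

def altZeta (a : List Int) : List Int :=
  if _h : a.length ≤ 1 then a
  else
    let h := a.length / 2
    let lo := altZeta (a.take h)
    let hi := altZeta (a.drop h)
    lo ++ (hi.zip lo).map (fun p => PySem.Int.mod (p.1 + p.2) pvM)
termination_by a.length
decreasing_by
  · simp only [List.length_take]; omega
  · simp only [List.length_drop]; omega

def altMobius (a : List Int) : List Int :=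
  if _h : a.length ≤ 1 then a
  else
    let h := a.length / 2
    let lo := altMobius (a.take h)
    let hi := altMobius (a.drop h)
    lo ++ (hi.zip lo).map (fun p => PySem.Int.mod (p.1 - p.2) pvM)
termination_by a.length
decreasing_by
  · simp only [List.length_take]; omega
  · simp only [List.length_drop]; omega

def Convolution_Power_OR_alt (A : List Int) (k : Int) : List Int :=
  let L := 1 <<< PySem.Int.bitLength ((A.length : Int) - 1)
  let z := altZeta (A ++ List.replicate (L - A.length) 0)
  let p := z.map (fun x => pvPow x k)
  altMobius p

-- ===== PRECONDITION & SPEC =====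
-- Pre_ excludes exactly the inputs on which Python A raises ValueError: k < 0 together with some
-- subset-OR sum of the (padded) input divisible by the prime Mod, where pow(x, k, Mod) has no
-- modular inverse to take; B's pow call raises identically there, so nothing returnable is lost.
def Pre_Convolution_Power_OR (A : List Int) (k : Int) : Prop :=
  0 ≤ k ∨ ∀ S < 1 <<< PySem.Int.bitLength ((A.length : Int) - 1),
    (((List.range (1 <<< PySem.Int.bitLength ((A.length : Int) - 1))).filter
        (fun T => T ||| S = S)).map (fun T => A.getD T 0)).sum % 998244353 ≠ 0
instance (A : List Int) (k : Int) : Decidable (Pre_Convolution_Power_OR A k) := by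
  unfold Pre_Convolution_Power_OR; infer_instance

def pvWitness_Convolution_Power_OR : List Int × Int := ([1, 2, 3], 2)

def Spec_Convolution_Power_OR (A : List Int) (k : Int) (out : List Int) : Prop := out = Convolution_Power_OR_alt A k
instance (A : List Int) (k : Int) (out : List Int) : Decidable (Spec_Convolution_Power_OR A k out) := by unfold Spec_Convolution_Power_OR; infer_instance

-- ===== CLAIM (what is proved, stated in full; the proofs are below) =====
def Claim_equal_Convolution_Power_OR : Prop := ∀ (A : List Int) (k : Int), Dom_Convolution_Power_OR A k → Pre_Convolution_Power_OR A k → Spec_Convolution_Power_OR A k (Convolution_Power_OR A k)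

-- ===== LEMMAS AND PROOFS =====

theorem pv_shl (n : Nat) : 1 <<< n = 2 ^ n := Nat.one_shiftLeft n

theorem pv_modM (x : Int) : PySem.Int.mod x pvM = x % 998244353 :=
  PySem.Int.mod_eq_emod_of_pos (by norm_num [pvM])

-- bit facts about indices split at the top bit
theorem pv_bit_low (s N : Nat) (h : s < 2 ^ N) : s &&& 2 ^ N = 0 := by
  simp [Nat.and_two_pow, Nat.testBit_lt_two_pow h]

theorem pv_bit_topand (s N : Nat) (hs : s < 2 ^ N) : (2 ^ N + s) &&& 2 ^ N ≠ 0 := by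
  rw [Nat.and_two_pow, Nat.testBit_two_pow_add_eq, Nat.testBit_lt_two_pow hs]
  simp

theorem pv_bit_topxor (s N : Nat) (h : s < 2 ^ N) : (2 ^ N + s) ^^^ 2 ^ N = s := by
  apply Nat.eq_of_testBit_eq
  intro j
  rw [Nat.testBit_xor, Nat.testBit_two_pow]
  rcases lt_trichotomy j N with hj | hj | hj
  · have : ¬ N = j := by omega
    rw [Nat.testBit_two_pow_add_gt hj]; simp [this]
  · subst hj
    rw [Nat.testBit_two_pow_add_eq, Nat.testBit_lt_two_pow h]
    simp
  · have h1 : 2 ^ N + s < 2 ^ j := by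
      calc 2 ^ N + s < 2 ^ N + 2 ^ N := by omega
      _ = 2 ^ (N+1) := by ring
      _ ≤ 2 ^ j := Nat.pow_le_pow_right (by norm_num) hj
    have : ¬ N = j := by omega
    rw [Nat.testBit_lt_two_pow h1, Nat.testBit_lt_two_pow (lt_of_lt_of_le h (Nat.pow_le_pow_right (by norm_num) hj.le))]
    simp [this]

theorem pv_bit_and (s N i : Nat) (hi : i < N) : (2 ^ N + s) &&& 2 ^ i = s &&& 2 ^ i := by
  rw [Nat.and_two_pow, Nat.and_two_pow, Nat.testBit_two_pow_add_gt hi]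

theorem pv_bit_xor (s N i : Nat) (hs : s < 2 ^ N) (hi : i < N) :
    (2 ^ N + s) ^^^ 2 ^ i = 2 ^ N + (s ^^^ 2 ^ i) := by
  have hx : s ^^^ 2 ^ i < 2 ^ N := Nat.xor_lt_two_pow hs (Nat.pow_lt_pow_right (by norm_num) hi)
  apply Nat.eq_of_testBit_eq
  intro j
  rw [Nat.testBit_xor, Nat.testBit_two_pow]
  rcases lt_trichotomy j N with hj | hj | hj
  · rw [Nat.testBit_two_pow_add_gt hj, Nat.testBit_two_pow_add_gt hj, Nat.testBit_xor, Nat.testBit_two_pow]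
  · subst hj
    have : ¬ i = j := by omega
    rw [Nat.testBit_two_pow_add_eq, Nat.testBit_two_pow_add_eq, Nat.testBit_lt_two_pow hs, Nat.testBit_lt_two_pow hx]
    simp [this]
  · have b1 : 2 ^ N + s < 2 ^ j := by
      calc 2 ^ N + s < 2 ^ N + 2 ^ N := by omega
      _ = 2 ^ (N+1) := by ring
      _ ≤ 2 ^ j := Nat.pow_le_pow_right (by norm_num) hj
    have b2 : 2 ^ N + (s ^^^ 2 ^ i) < 2 ^ j := by
      calc 2 ^ N + (s ^^^ 2^i) < 2 ^ N + 2 ^ N := by omega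
      _ = 2 ^ (N+1) := by ring
      _ ≤ 2 ^ j := Nat.pow_le_pow_right (by norm_num) hj
    have : ¬ i = j := by omega
    rw [Nat.testBit_lt_two_pow b1, Nat.testBit_lt_two_pow b2]
    simp [this]

-- generic loop-shape lemmas ------------------------------------------------

theorem pv_foldl_len (step : List Int → Nat → List Int)
    (hlen : ∀ B S, (step B S).length = B.length) :
    ∀ (l : List Nat) (A : List Int), (l.foldl step A).length = A.length := by
  intro l; induction l with
  | nil => intro A; rfl
  | cons i t ih => intro A; simp only [List.foldl_cons, ih, hlen]

theorem pv_foldl_left (h : Nat) (σb σs : List Int → Nat → List Int)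
    (hs : ∀ (X Y : List Int) S, X.length = h → S < h → σb (X ++ Y) S = σs X S ++ Y)
    (hlen : ∀ X S, (σs X S).length = X.length) :
    ∀ (l : List Nat) (X Y : List Int), X.length = h → (∀ i ∈ l, i < h) →
      l.foldl σb (X ++ Y) = l.foldl σs X ++ Y := by
  intro l
  induction l with
  | nil => intro X Y _ _; rfl
  | cons i t ih =>
    intro X Y hX hmem
    simp only [List.foldl_cons]
    rw [hs X Y i hX (hmem i (by simp))]
    exact ih (σs X i) Y (by rw [hlen, hX]) (fun j hj => hmem j (by simp [hj]))

theorem pv_foldl_right (h : Nat) (X : List Int) (σb σs : List Int → Nat → List Int)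
    (hs : ∀ (Y : List Int) S, S < h → σb (X ++ Y) (h + S) = X ++ σs Y S) :
    ∀ (l : List Nat) (Y : List Int), (∀ i ∈ l, i < h) →
      (l.map (h + ·)).foldl σb (X ++ Y) = X ++ l.foldl σs Y := by
  intro l
  induction l with
  | nil => intro Y _; rfl
  | cons i t ih =>
    intro Y hmem
    simp only [List.map_cons, List.foldl_cons]
    rw [hs Y i (hmem i (by simp))]
    exact ih (σs Y i) (fun j hj => hmem j (by simp [hj]))

-- foldl over range that writes position S with a value read at position S only
theorem pv_foldl_engine (A : List Int) (g : Nat → Int) (step : List Int → Nat → List Int)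
    (hstep : ∀ B S, S < A.length → B.length = A.length →
      (∀ t, S ≤ t → t < A.length → B.getD t 0 = A.getD t 0) → step B S = B.set S (g S)) :
    ∀ j, j ≤ A.length → (List.range j).foldl step A = (List.range j).map g ++ A.drop j := by
  intro j
  induction j with
  | zero => intro _; simp
  | succ j ih =>
    intro hj
    have hj' : j < A.length := hj
    rw [List.range_succ, List.foldl_append, List.map_append, ih hj'.le]
    have hBlen : (List.map g (List.range j) ++ List.drop j A).length = A.length := by
      simp; omega
    have hagree : ∀ t, j ≤ t → t < A.length →
        (List.map g (List.range j) ++ List.drop j A).getD t 0 = A.getD t 0 := by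
      intro t ht htl
      rw [List.getD_append_right _ _ _ _ (by simpa using ht)]
      simp only [List.length_map, List.length_range]
      rw [List.getD_eq_getElem?_getD, List.getD_eq_getElem?_getD, List.getElem?_drop]
      congr 2
      omega
    simp only [List.foldl_cons, List.foldl_nil]
    rw [hstep _ j hj' hBlen hagree, List.set_append]
    simp only [List.length_map, List.length_range, lt_irrefl, Nat.sub_self]
    rw [List.drop_eq_getElem_cons hj']
    simp only [List.map_cons, List.map_nil, List.set_cons_zero, List.append_assoc,
      List.cons_append, List.nil_append]
    simp

theorem pv_map_range_getD (F : Int → Int) (P : List Int) :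
    (List.range P.length).map (fun S => F (P.getD S 0)) = P.map F := by
  apply List.ext_getElem
  · simp
  · intro i h1 h2
    simp only [List.getElem_map, List.getElem_range]
    congr 1
    rw [List.getD_eq_getElem _ _ (by simpa using h1)]

theorem pv_foldl_pair (stepB stepS : List Int → Nat → List Int) (h : Nat)
    (hlen : ∀ X i, (stepS X i).length = X.length) :
    ∀ (l : List Nat) (X Y : List Int), X.length = h → Y.length = h →
      (∀ (X' Y' : List Int) i, i ∈ l → X'.length = h → Y'.length = h →
        stepB (X' ++ Y') i = stepS X' i ++ stepS Y' i) →
      l.foldl stepB (X ++ Y) = l.foldl stepS X ++ l.foldl stepS Y := by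
  intro l
  induction l with
  | nil => intro X Y _ _ _; rfl
  | cons i t ih =>
    intro X Y hX hY hsp
    simp only [List.foldl_cons]
    rw [hsp X Y i (by simp) hX hY]
    exact ih _ _ (by rw [hlen, hX]) (by rw [hlen, hY])
      (fun X' Y' j hj => hsp X' Y' j (by simp [hj]))

-- layer lemmas -------------------------------------------------------------


theorem pvStep_len (f b : _) (B : List Int) (S : Nat) : (pvStep f b B S).length = B.length := by
  unfold pvStep; split <;> simp

theorem pvModStep_len (B : List Int) (S : Nat) : (pvModStep B S).length = B.length := by
  simp [pvModStep]

theorem pvLayer_len (f : Int → Int → Int) (b n : Nat) (A : List Int) :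
    (pvLayer f b n A).length = A.length :=
  pv_foldl_len _ (pvStep_len f b) _ A

theorem pvModLayer_len (n : Nat) (A : List Int) : (pvModLayer n A).length = A.length :=
  pv_foldl_len _ pvModStep_len _ A

-- a low layer (bit i < N) acts on the two halves independently

theorem pvStep_left (f : Int → Int → Int) (N i : Nat) (hi : i ≤ N) (X Y : List Int) (S : Nat)
    (hX : X.length = 2 ^ N) (hS : S < 2 ^ N) :
    pvStep f (2 ^ i) (X ++ Y) S = pvStep f (2 ^ i) X S ++ Y := by
  unfold pvStep
  by_cases hc : S &&& 2 ^ i ≠ 0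
  · have hiN : i < N := by
      rcases Nat.lt_or_ge i N with h | h
      · exact h
      · exfalso
        have : i = N := le_antisymm hi h
        subst this
        exact hc (pv_bit_low S i hS)
    have hx : S ^^^ 2 ^ i < 2 ^ N :=
      Nat.xor_lt_two_pow hS (Nat.pow_lt_pow_right (by norm_num) hiN)
    rw [if_pos hc, if_pos hc, List.getD_append _ _ _ _ (by omega),
      List.getD_append _ _ _ _ (by omega), List.set_append, if_pos (by omega)]
  · rw [if_neg hc, if_neg hc]

theorem pvStep_right (f : Int → Int → Int) (N i : Nat) (hi : i < N) (X Y : List Int) (s : Nat)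
    (hX : X.length = 2 ^ N) (hs : s < 2 ^ N) :
    pvStep f (2 ^ i) (X ++ Y) (2 ^ N + s) = X ++ pvStep f (2 ^ i) Y s := by
  unfold pvStep
  rw [pv_bit_and s N i hi]
  by_cases hc : s &&& 2 ^ i ≠ 0
  · have hx : s ^^^ 2 ^ i < 2 ^ N :=
      Nat.xor_lt_two_pow hs (Nat.pow_lt_pow_right (by norm_num) hi)
    rw [if_pos hc, if_pos hc, pv_bit_xor s N i hs hi,
      List.getD_append_right _ _ _ _ (by omega), List.getD_append_right _ _ _ _ (by omega),
      List.set_append, if_neg (by omega), hX]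
    simp
  · rw [if_neg hc, if_neg hc]

theorem pvStep_top (f : Int → Int → Int) (N : Nat) (X Y : List Int) (s : Nat)
    (hX : X.length = 2 ^ N) (hs : s < 2 ^ N) :
    pvStep f (2 ^ N) (X ++ Y) (2 ^ N + s) = X ++ Y.set s (f (Y.getD s 0) (X.getD s 0)) := by
  unfold pvStep
  rw [if_pos (pv_bit_topand s N hs), pv_bit_topxor s N hs,
    List.getD_append_right _ _ _ _ (by omega), List.getD_append _ _ _ _ (by omega),
    List.set_append, if_neg (by omega), hX]
  simp

theorem pvModStep_left (X Y : List Int) (S : Nat) (hS : S < X.length) :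
    pvModStep (X ++ Y) S = pvModStep X S ++ Y := by
  unfold pvModStep
  rw [List.getD_append _ _ _ _ hS, List.set_append, if_pos hS]

theorem pvModStep_right (X Y : List Int) (s : Nat) :
    pvModStep (X ++ Y) (X.length + s) = X ++ pvModStep Y s := by
  unfold pvModStep
  rw [List.getD_append_right _ _ _ _ (by omega), List.set_append, if_neg (by omega)]
  simp

theorem pv_foldl_fix (step : List Int → Nat → List Int) :
    ∀ (l : List Nat) (A : List Int), (∀ B i, i ∈ l → step B i = B) → l.foldl step A = A := by
  intro l
  induction l with
  | nil => intro A _; rfl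
  | cons i t ih =>
    intro A hfix
    simp only [List.foldl_cons, hfix A i (by simp)]
    exact ih A (fun B j hj => hfix B j (by simp [hj]))

theorem pvLayer_split (f : Int → Int → Int) (N i : Nat) (hi : i < N) (X Y : List Int)
    (hX : X.length = 2 ^ N) (_hY : Y.length = 2 ^ N) :
    pvLayer f (2 ^ i) (2 ^ (N + 1)) (X ++ Y) =
      pvLayer f (2 ^ i) (2 ^ N) X ++ pvLayer f (2 ^ i) (2 ^ N) Y := by
  unfold pvLayer
  have hpow : 2 ^ (N + 1) = 2 ^ N + 2 ^ N := by ring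
  rw [hpow, List.range_add, List.foldl_append]
  rw [pv_foldl_left (2 ^ N) (pvStep f (2 ^ i)) (pvStep f (2 ^ i))
      (fun X' Y' S hX' hS => pvStep_left f N i hi.le X' Y' S hX' hS)
      (pvStep_len f (2 ^ i)) (List.range (2 ^ N)) X Y hX (by simp)]
  have hlen2 : ((List.range (2 ^ N)).foldl (pvStep f (2 ^ i)) X).length = 2 ^ N := by
    rw [pv_foldl_len (pvStep f (2 ^ i)) (pvStep_len f (2 ^ i)) _ X, hX]
  exact pv_foldl_right (2 ^ N) _ (pvStep f (2 ^ i)) (pvStep f (2 ^ i))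
    (fun Y' S hS => pvStep_right f N i hi _ Y' S hlen2 hS) (List.range (2 ^ N)) Y (by simp)

theorem pvLayer_top (f : Int → Int → Int) (N : Nat) (X Y : List Int)
    (hX : X.length = 2 ^ N) (hY : Y.length = 2 ^ N) :
    pvLayer f (2 ^ N) (2 ^ (N + 1)) (X ++ Y) =
      X ++ (List.range (2 ^ N)).map (fun s => f (Y.getD s 0) (X.getD s 0)) := by
  unfold pvLayer
  have hpow : 2 ^ (N + 1) = 2 ^ N + 2 ^ N := by ring
  rw [hpow, List.range_add, List.foldl_append]
  have h1 : (List.range (2 ^ N)).foldl (pvStep f (2 ^ N)) (X ++ Y) = X ++ Y := by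
    apply pv_foldl_fix
    intro B S hS
    unfold pvStep
    rw [if_neg (by simpa using pv_bit_low S N (by simpa using hS))]
  rw [h1]
  rw [pv_foldl_right (2 ^ N) X (pvStep f (2 ^ N))
      (fun Y' s => Y'.set s (f (Y'.getD s 0) (X.getD s 0)))
      (fun Y' s hs => pvStep_top f N X Y' s hX hs) (List.range (2 ^ N)) Y (by simp)]
  congr 1
  have := pv_foldl_engine Y (fun s => f (Y.getD s 0) (X.getD s 0))
      (fun Y' s => Y'.set s (f (Y'.getD s 0) (X.getD s 0)))
      (by
        intro B S hS hB hag
        show B.set S (f (B.getD S 0) (X.getD S 0)) = B.set S (f (Y.getD S 0) (X.getD S 0))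
        rw [hag S le_rfl hS])
      Y.length le_rfl
  rw [hY] at this
  rw [this]
  simp [hY]

theorem pvModLayer_half (X : List Int) :
    pvModLayer X.length X = X.map (fun x => PySem.Int.mod x pvM) := by
  unfold pvModLayer
  have := pv_foldl_engine X (fun S => PySem.Int.mod (X.getD S 0) pvM) pvModStep
      (by
        intro B S hS hB hag
        unfold pvModStep
        rw [hag S le_rfl hS])
      X.length le_rfl
  rw [this, List.drop_length, List.append_nil]
  exact pv_map_range_getD (fun x => PySem.Int.mod x pvM) X

theorem pvModLayer_split (N : Nat) (X Y : List Int)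
    (hX : X.length = 2 ^ N) (hY : Y.length = 2 ^ N) :
    pvModLayer (2 ^ (N + 1)) (X ++ Y) =
      X.map (fun x => PySem.Int.mod x pvM) ++ Y.map (fun x => PySem.Int.mod x pvM) := by
  unfold pvModLayer
  have hpow : 2 ^ (N + 1) = 2 ^ N + 2 ^ N := by ring
  rw [hpow, List.range_add, List.foldl_append]
  rw [pv_foldl_left (2 ^ N) pvModStep pvModStep
      (fun X' Y' S hX' hS => pvModStep_left X' Y' S (by omega))
      (fun X' S => by simp [pvModStep]) (List.range (2 ^ N)) X Y hX (by simp)]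
  have hXm : ((List.range (2 ^ N)).foldl pvModStep X) = pvModLayer (2 ^ N) X := rfl
  have hXm2 : pvModLayer (2 ^ N) X = X.map (fun x => PySem.Int.mod x pvM) := by
    rw [← hX]; exact pvModLayer_half X
  rw [hXm, hXm2]
  rw [pv_foldl_right (2 ^ N) _ pvModStep pvModStep
      (fun Y' s hs => by
        have := pvModStep_right (X.map (fun x => PySem.Int.mod x pvM)) Y' s
        rwa [List.length_map, hX] at this) (List.range (2 ^ N)) Y (by simp)]
  congr 1
  rw [← hY]; exact pvModLayer_half Y

-- core lemmas --------------------------------------------------------------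


theorem pvCore_len (f : Int → Int → Int) (N : Nat) (A : List Int) :
    (pvCore f N A).length = A.length :=
  pv_foldl_len _ (fun B i => by rw [pvModLayer_len, pvLayer_len]) _ A

theorem pvCore_succ (f : Int → Int → Int) (N : Nat) (X Y : List Int)
    (hX : X.length = 2 ^ N) (hY : Y.length = 2 ^ N) :
    pvCore f (N + 1) (X ++ Y) =
      (pvCore f N X).map (fun x => PySem.Int.mod x pvM) ++
      (List.range (2 ^ N)).map
        (fun s => PySem.Int.mod (f ((pvCore f N Y).getD s 0) ((pvCore f N X).getD s 0)) pvM) := by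
  unfold pvCore
  simp only [pv_shl]
  rw [List.range_succ, List.foldl_append]
  have hsplit := pv_foldl_pair
    (fun B i => pvModLayer (2 ^ (N + 1)) (pvLayer f (2 ^ i) (2 ^ (N + 1)) B))
    (fun B i => pvModLayer (2 ^ N) (pvLayer f (2 ^ i) (2 ^ N) B)) (2 ^ N)
    (fun B i => by rw [pvModLayer_len, pvLayer_len])
    (List.range N) X Y hX hY
    (by
      intro X' Y' i hi hX' hY'
      have hiN : i < N := by simpa using hi
      show pvModLayer (2 ^ (N + 1)) (pvLayer f (2 ^ i) (2 ^ (N + 1)) (X' ++ Y')) =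
        pvModLayer (2 ^ N) (pvLayer f (2 ^ i) (2 ^ N) X') ++
          pvModLayer (2 ^ N) (pvLayer f (2 ^ i) (2 ^ N) Y')
      rw [pvLayer_split f N i hiN X' Y' hX' hY',
        pvModLayer_split N _ _ (by rw [pvLayer_len, hX']) (by rw [pvLayer_len, hY'])]
      have e1 := pvModLayer_half (pvLayer f (2 ^ i) (2 ^ N) X')
      have e2 := pvModLayer_half (pvLayer f (2 ^ i) (2 ^ N) Y')
      rw [pvLayer_len, hX'] at e1
      rw [pvLayer_len, hY'] at e2
      rw [e1, e2])
  rw [hsplit]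
  set U := (List.range N).foldl (fun B i => pvModLayer (2 ^ N) (pvLayer f (2 ^ i) (2 ^ N) B)) X with hU
  set V := (List.range N).foldl (fun B i => pvModLayer (2 ^ N) (pvLayer f (2 ^ i) (2 ^ N) B)) Y with hV
  have hUlen : U.length = 2 ^ N := by
    rw [hU, pv_foldl_len _ (fun B i => by rw [pvModLayer_len, pvLayer_len]) _ X, hX]
  have hVlen : V.length = 2 ^ N := by
    rw [hV, pv_foldl_len _ (fun B i => by rw [pvModLayer_len, pvLayer_len]) _ Y, hY]
  simp only [List.foldl_cons, List.foldl_nil]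
  rw [pvLayer_top f N U V hUlen hVlen,
    pvModLayer_split N _ _ hUlen (by simp),
    List.map_map]
  rfl

-- bit_length gluing --------------------------------------------------------


theorem pv_bl_pow (N : Nat) : PySem.Int.bitLength (((2 ^ N - 1 : Nat) : Int)) = N := by
  induction N with
  | zero => simp [PySem.Int.bitLength_zero]
  | succ n ih =>
    have h1 : 0 < 2 ^ (n + 1) - 1 := by
      have : 2 ≤ 2 ^ (n + 1) := Nat.one_lt_two_pow (by omega)
      omega
    rw [PySem.Int.bitLength_natCast h1]
    have h2 : (2 ^ (n + 1) - 1) / 2 = 2 ^ n - 1 := by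
      have : 2 ^ (n + 1) = 2 * 2 ^ n := by ring
      have h3 : 1 ≤ 2 ^ n := Nat.one_le_two_pow
      omega
    rw [h2, ih]

theorem pv_le_L (n : Nat) : n ≤ 2 ^ PySem.Int.bitLength ((n : Int) - 1) := by
  rcases Nat.eq_zero_or_pos n with h | h
  · subst h; simp
  · have hcast : ((n : Int) - 1) = ((n - 1 : Nat) : Int) := by omega
    rw [hcast]
    have := PySem.Int.lt_two_pow_bitLength ((n - 1 : Nat) : Int)
    simp only [Int.natAbs_natCast] at this
    omega

-- pow lemmas ---------------------------------------------------------------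


theorem pvPowAux_lt (e b m : Nat) (hm : 0 < m) : pvPowAux b e m < m := by
  induction e using Nat.strong_induction_on generalizing b with
  | _ e ih =>
    rw [pvPowAux]
    split
    · exact Nat.mod_lt _ hm
    · next h =>
      split
      · exact Nat.mod_lt _ hm
      · exact ih (e / 2) (Nat.div_lt_self (Nat.pos_of_ne_zero h) one_lt_two) _

theorem pvPow_congr (x y k : Int) (h : x % 998244353 = y % 998244353) : pvPow x k = pvPow y k := by
  unfold pvPow
  rw [pv_modM, pv_modM, h]

theorem pvPow_bounds (x k : Int) : 0 ≤ pvPow x k ∧ pvPow x k < pvM := by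
  unfold pvPow pvM
  refine ⟨by split <;> positivity, ?_⟩
  split
  · exact_mod_cast pvPowAux_lt k.natAbs _ 998244353 (by norm_num)
  · exact_mod_cast pvPowAux_lt k.toNat _ 998244353 (by norm_num)

-- the two inductions -------------------------------------------------------

-- getD plumbing ------------------------------------------------------------


theorem pv_getD_map (F : Int → Int) (P : List Int) (s : Nat) (hs : s < P.length) :
    (P.map F).getD s 0 = F (P.getD s 0) := by
  rw [List.getD_eq_getElem _ _ (by simpa using hs), List.getD_eq_getElem _ _ hs, List.getElem_map]

theorem pv_getD_zipmap (F : Int × Int → Int) (P Q : List Int) (s : Nat)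
    (hP : s < P.length) (hQ : s < Q.length) :
    ((P.zip Q).map F).getD s 0 = F (P.getD s 0, Q.getD s 0) := by
  rw [List.getD_eq_getElem _ _ (by simp; omega), List.getElem_map, List.getElem_zip,
    List.getD_eq_getElem _ _ hP, List.getD_eq_getElem _ _ hQ]

theorem pv_getD_rangemap (g : Nat → Int) (n s : Nat) (hs : s < n) :
    ((List.range n).map g).getD s 0 = g s := by
  rw [List.getD_eq_getElem _ _ (by simpa using hs), List.getElem_map, List.getElem_range]

theorem pv_emod_emod (x : Int) : x % 998244353 % 998244353 = x % 998244353 :=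
  Int.emod_emod_of_dvd x dvd_rfl

theorem pv_mod_bounds (x : Int) : 0 ≤ PySem.Int.mod x pvM ∧ PySem.Int.mod x pvM < pvM :=
  ⟨PySem.Int.mod_nonneg x (by norm_num [pvM]), PySem.Int.mod_lt x (by norm_num [pvM])⟩

-- the two inductions -------------------------------------------------------


theorem altZeta_core (N : Nat) (X : List Int) (hX : X.length = 2 ^ N) :
    (altZeta X).length = 2 ^ N ∧ ∀ s, s < 2 ^ N →
      (altZeta X).getD s 0 % 998244353 = (pvCore (· + ·) N X).getD s 0 % 998244353 := by
  induction N generalizing X with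
  | zero =>
    rw [altZeta, dif_pos (by omega)]
    exact ⟨hX, fun s hs => rfl⟩
  | succ n ih =>
    have h2 : (2:Nat) ^ (n + 1) = 2 ^ n + 2 ^ n := by ring
    have hgt : ¬ X.length ≤ 1 := by
      rw [hX]; have := Nat.one_le_two_pow (n := n); omega
    have hhalf : X.length / 2 = 2 ^ n := by rw [hX]; omega
    have htake : (X.take (2 ^ n)).length = 2 ^ n := by simp [hX]; omega
    have hdrop : (X.drop (2 ^ n)).length = 2 ^ n := by simp [hX]; omega
    obtain ⟨ihlL, ihlP⟩ := ih (X.take (2 ^ n)) htake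
    obtain ⟨ihhL, ihhP⟩ := ih (X.drop (2 ^ n)) hdrop
    have hsplit := pvCore_succ (· + ·) n (X.take (2 ^ n)) (X.drop (2 ^ n)) htake hdrop
    rw [List.take_append_drop] at hsplit
    rw [altZeta, dif_neg hgt]
    simp only [hhalf]
    constructor
    · simp only [List.length_append, List.length_map, List.length_zip, ihlL, ihhL, h2]
      omega
    · intro s hs
      rw [hsplit]
      by_cases hlo : s < 2 ^ n
      · rw [List.getD_append _ _ _ _ (by rw [ihlL]; exact hlo),
          List.getD_append _ _ _ _ (by rw [List.length_map, pvCore_len, htake]; exact hlo),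
          pv_getD_map _ _ _ (by rw [pvCore_len, htake]; exact hlo),
          pv_modM, pv_emod_emod]
        exact ihlP s hlo
      · have hs' : s - 2 ^ n < 2 ^ n := by omega
        rw [List.getD_append_right _ _ _ _ (by rw [ihlL]; omega),
          List.getD_append_right _ _ _ _ (by rw [List.length_map, pvCore_len, htake]; omega),
          ihlL, List.length_map, pvCore_len, htake,
          pv_getD_zipmap _ _ _ _ (by omega) (by omega),
          pv_getD_rangemap _ _ _ hs']
        simp only [pv_modM, pv_emod_emod]
        rw [Int.add_emod, ihhP _ hs', ihlP _ hs', ← Int.add_emod]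

theorem altMobius_core (N : Nat) (X : List Int) (hX : X.length = 2 ^ N)
    (hB : ∀ s, s < 2 ^ N → 0 ≤ X.getD s 0 ∧ X.getD s 0 < pvM) :
    altMobius X = pvCore (· - ·) N X ∧
      ∀ s, s < 2 ^ N → 0 ≤ (altMobius X).getD s 0 ∧ (altMobius X).getD s 0 < pvM := by
  induction N generalizing X with
  | zero =>
    rw [altMobius, dif_pos (by omega)]
    exact ⟨rfl, hB⟩
  | succ n ih =>
    have h2 : (2:Nat) ^ (n + 1) = 2 ^ n + 2 ^ n := by ring
    have hgt : ¬ X.length ≤ 1 := by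
      rw [hX]; have := Nat.one_le_two_pow (n := n); omega
    have hhalf : X.length / 2 = 2 ^ n := by rw [hX]; omega
    have htake : (X.take (2 ^ n)).length = 2 ^ n := by simp [hX]; omega
    have hdrop : (X.drop (2 ^ n)).length = 2 ^ n := by simp [hX]; omega
    have hBt : ∀ s, s < 2 ^ n → 0 ≤ (X.take (2 ^ n)).getD s 0 ∧ (X.take (2 ^ n)).getD s 0 < pvM := by
      intro s hs
      rw [List.getD_eq_getElem _ _ (by omega), List.getElem_take]
      rw [← List.getD_eq_getElem X 0 (by omega)]
      exact hB s (by omega)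
    have hBd : ∀ s, s < 2 ^ n → 0 ≤ (X.drop (2 ^ n)).getD s 0 ∧ (X.drop (2 ^ n)).getD s 0 < pvM := by
      intro s hs
      rw [List.getD_eq_getElem _ _ (by omega), List.getElem_drop]
      rw [← List.getD_eq_getElem X 0 (by rw [hX]; omega)]
      exact hB _ (by omega)
    obtain ⟨ihlE, ihlB⟩ := ih (X.take (2 ^ n)) htake hBt
    obtain ⟨ihhE, ihhB⟩ := ih (X.drop (2 ^ n)) hdrop hBd
    have hlL : (altMobius (X.take (2 ^ n))).length = 2 ^ n := by
      rw [ihlE, pvCore_len, htake]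
    have hhL : (altMobius (X.drop (2 ^ n))).length = 2 ^ n := by
      rw [ihhE, pvCore_len, hdrop]
    have hsplit := pvCore_succ (· - ·) n (X.take (2 ^ n)) (X.drop (2 ^ n)) htake hdrop
    rw [List.take_append_drop] at hsplit
    have hmapid : (pvCore (· - ·) n (X.take (2 ^ n))).map (fun x => PySem.Int.mod x pvM) =
        pvCore (· - ·) n (X.take (2 ^ n)) := by
      apply List.ext_getElem (by simp)
      intro i hi1 hi2
      have hi3 : i < 2 ^ n := by rw [pvCore_len, htake] at hi2; exact hi2
      rw [List.getElem_map]
      rw [← List.getD_eq_getElem _ 0 hi2]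
      have hb := ihlB i hi3
      rw [ihlE] at hb
      rw [pv_modM]
      exact Int.emod_eq_of_lt hb.1 (by simpa [pvM] using hb.2)
    have hzip : ((altMobius (X.drop (2 ^ n))).zip (altMobius (X.take (2 ^ n)))).map
          (fun p => PySem.Int.mod (p.1 - p.2) pvM) =
        (List.range (2 ^ n)).map (fun s =>
          PySem.Int.mod ((pvCore (· - ·) n (X.drop (2 ^ n))).getD s 0 -
            (pvCore (· - ·) n (X.take (2 ^ n))).getD s 0) pvM) := by
      apply List.ext_getElem (by simp [hlL, hhL])
      intro i hi1 hi2
      have hi3 : i < 2 ^ n := by simpa using hi2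
      rw [← List.getD_eq_getElem _ 0 hi1, ← List.getD_eq_getElem _ 0 hi2,
        pv_getD_zipmap _ _ _ _ (by omega) (by omega), pv_getD_rangemap _ _ _ hi3,
        ihlE, ihhE]
    constructor
    · rw [altMobius, dif_neg hgt]
      simp only [hhalf]
      rw [hsplit, hmapid, hzip, ihlE]
    · intro s hs
      rw [altMobius, dif_neg hgt]
      simp only [hhalf]
      by_cases hlo : s < 2 ^ n
      · rw [List.getD_append _ _ _ _ (by omega)]
        exact ihlB s hlo
      · rw [List.getD_append_right _ _ _ _ (by omega), hlL,
          pv_getD_zipmap _ _ _ _ (by omega) (by omega)]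
        exact pv_mod_bounds _

-- main ---------------------------------------------------------------------


theorem pv_main (A : List Int) (k : Int) :
    Convolution_Power_OR A k = Convolution_Power_OR_alt A k := by
  unfold Convolution_Power_OR Convolution_Power_OR_alt
  simp only [pv_shl]
  set NL := PySem.Int.bitLength ((A.length : Int) - 1) with hNL
  set A1 := A ++ List.replicate (2 ^ NL - A.length) 0 with hA1
  have hlen1 : A1.length = 2 ^ NL := by
    rw [hA1, List.length_append, List.length_replicate]
    have := pv_le_L A.length
    rw [← hNL] at this
    omega
  have hbl1 : PySem.Int.bitLength ((A1.length : Int) - 1) = NL := by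
    rw [hlen1]
    have hcast : (((2 ^ NL : Nat) : Int) - 1) = ((2 ^ NL - 1 : Nat) : Int) := by
      have : (1:Nat) ≤ 2 ^ NL := Nat.one_le_two_pow
      omega
    rw [hcast, pv_bl_pow]
  obtain ⟨hzL, hzP⟩ := altZeta_core NL A1 hlen1
  have hzeta : Subset_Zeta_Transform A1 = pvCore (· + ·) NL A1 := by
    unfold Subset_Zeta_Transform
    rw [hbl1]
  set A2 := Subset_Zeta_Transform A1 with hA2
  have hA2len : A2.length = 2 ^ NL := by rw [hzeta, pvCore_len, hlen1]
  have hA3 : (List.range (2 ^ NL)).map (fun i => pvPow (A2.getD i 0) k) =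
      (altZeta A1).map (fun x => pvPow x k) := by
    apply List.ext_getElem (by simp [hzL])
    intro i hi1 hi2
    have hi : i < 2 ^ NL := by simpa using hi1
    rw [List.getElem_map, List.getElem_map, List.getElem_range]
    rw [← List.getD_eq_getElem _ 0 (by rw [hzL]; exact hi)]
    apply pvPow_congr
    rw [hzeta]
    exact (hzP i hi).symm
  set A3 := (List.range (2 ^ NL)).map (fun i => pvPow (A2.getD i 0) k) with hA3def
  have hA3len : A3.length = 2 ^ NL := by simp [hA3def]
  have hbl3 : PySem.Int.bitLength ((A3.length : Int) - 1) = NL := by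
    rw [hA3len]
    have hcast : (((2 ^ NL : Nat) : Int) - 1) = ((2 ^ NL - 1 : Nat) : Int) := by
      have : (1:Nat) ≤ 2 ^ NL := Nat.one_le_two_pow
      omega
    rw [hcast, pv_bl_pow]
  have hA3B : ∀ s, s < 2 ^ NL → 0 ≤ A3.getD s 0 ∧ A3.getD s 0 < pvM := by
    intro s hs
    rw [hA3def, pv_getD_rangemap _ _ _ hs]
    exact pvPow_bounds _ k
  obtain ⟨hmE, _⟩ := altMobius_core NL A3 hA3len hA3B
  have hmob : Subset_Mobius_Transform A3 = pvCore (· - ·) NL A3 := by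
    unfold Subset_Mobius_Transform
    rw [hbl3]
  rw [hmob, ← hA3]
  exact hmE.symm

-- ===== VERDICT (by name: the statement is the Claim_ definition above) =====
theorem Convolution_Power_OR_spec : Claim_equal_Convolution_Power_OR := by
  intro A k _ _
  unfold Spec_Convolution_Power_OR
  exact pv_main A k
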